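-- pv_equiv track=rewrite | github.com/alenny/leetcode-python3 | src/minimum-unique-word-abbreviation.py | makeAbbr
-- ===== SOURCE A (Python) =====
-- def makeAbbr(binary, target):
--     parts = []
--     countOne = 0
--     for i in range(len(target)):
--         if binary & (1 << i):
--             countOne += 1
--             continue
--         if countOne > 0:
--             parts.append(str(countOne))
--             countOne = 0
--         parts.append(target[i])
--     if countOne > 0:
--         parts.append(str(countOne))
--     return ''.join(parts)
-- ===== SOURCE B (Python) =====
-- def makeAbbr(binary, target):
--     # run-based: an outer loop over runs; an inner scan consumes each run of set bits
--     res = []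
--     n = len(target)
--     i = 0
--     while i < n:
--         if binary & (1 << i):
--             j = i + 1
--             while j < n and binary & (1 << j):
--                 j += 1
--             res.append(str(j - i))
--             i = j
--         else:
--             res.append(target[i])
--             i += 1
--     return ''.join(res)
-- ===== Notes on version B (the rewrite author's own statement) =====
-- stated objective: alternative
-- what changed: Replaces A's per-character flag/accumulator (countOne with an end-of-loop flush) by a run-based two-level while loop: an inner scan finds the end of each run of set bits and emits its length at once, so no pending-count state or final flush exists.
import Mathlib
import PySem

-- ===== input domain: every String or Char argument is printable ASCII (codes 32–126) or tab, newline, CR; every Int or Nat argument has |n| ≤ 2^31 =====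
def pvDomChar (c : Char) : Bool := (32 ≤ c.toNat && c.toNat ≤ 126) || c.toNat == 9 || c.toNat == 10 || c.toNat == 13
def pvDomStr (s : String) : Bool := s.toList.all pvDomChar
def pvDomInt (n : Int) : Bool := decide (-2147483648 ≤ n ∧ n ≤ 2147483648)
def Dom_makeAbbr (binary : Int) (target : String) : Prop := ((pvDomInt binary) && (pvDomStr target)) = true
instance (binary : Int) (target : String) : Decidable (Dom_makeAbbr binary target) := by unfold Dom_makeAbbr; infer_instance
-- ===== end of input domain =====

-- B is an alternative run-based decomposition (inner scan per run of set bits) of A's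
-- flag-accumulator loop; same O(n) cost, equal return value everywhere.

-- ===== PORT A =====
-- the for-loop of A, transcribed as index recursion over the same state (parts, countOne)
def makeAbbrLoopA (binary : Int) (cs : List Char) (n : Nat) (i : Nat)
    (parts : List String) (countOne : Nat) : List String × Nat :=
  if i < n then
    if PySem.Int.band binary ((1 : Int) <<< i) ≠ 0 then   -- binary & (1 << i)
      makeAbbrLoopA binary cs n (i + 1) parts (countOne + 1)
    else
      makeAbbrLoopA binary cs n (i + 1)
        ((if countOne > 0 then parts ++ [PySem.Int.toStr countOne] else parts)
          ++ [String.ofList [cs.getD i ' ']]) 0               -- parts.append(target[i]); i in range so getD is exact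
  else (parts, countOne)
termination_by n - i

def makeAbbr (binary : Int) (target : String) : String :=
  let cs := target.toList
  let st := makeAbbrLoopA binary cs cs.length 0 [] 0
  String.join (st.1 ++ if st.2 > 0 then [PySem.Int.toStr st.2] else [])

-- ===== PORT B =====
-- inner while: first index j' ≥ j with j' = n or bit j' clear
def makeAbbrRunEnd (binary : Int) (n : Nat) (j : Nat) : Nat :=
  if j < n ∧ PySem.Int.band binary ((1 : Int) <<< j) ≠ 0 then
    makeAbbrRunEnd binary n (j + 1)
  else j
termination_by n - j

-- cited by altLoop's decreasing_by
theorem makeAbbrRunEnd_ge (binary : Int) (n j : Nat) : j ≤ makeAbbrRunEnd binary n j := by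
  unfold makeAbbrRunEnd
  split
  · exact Nat.le_trans (Nat.le_succ j) (makeAbbrRunEnd_ge binary n (j + 1))
  · exact Nat.le_refl j
termination_by n - j

-- outer while over runs
def makeAbbrLoopB (binary : Int) (cs : List Char) (n : Nat) (i : Nat)
    (res : List String) : List String :=
  if _h : i < n then
    if PySem.Int.band binary ((1 : Int) <<< i) ≠ 0 then
      let j := makeAbbrRunEnd binary n (i + 1)
      makeAbbrLoopB binary cs n j (res ++ [PySem.Int.toStr ((j : Int) - (i : Int))])
    else
      makeAbbrLoopB binary cs n (i + 1) (res ++ [String.ofList [cs.getD i ' ']])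
  else res
termination_by n - i
decreasing_by
  · have := makeAbbrRunEnd_ge binary n (i + 1); omega
  · omega

def makeAbbr_alt (binary : Int) (target : String) : String :=
  let cs := target.toList
  String.join (makeAbbrLoopB binary cs cs.length 0 [])

-- ===== PRECONDITION & SPEC =====
def Spec_makeAbbr (binary : Int) (target : String) (out : String) : Prop := out = makeAbbr_alt binary target
instance (binary : Int) (target : String) (out : String) : Decidable (Spec_makeAbbr binary target out) := by unfold Spec_makeAbbr; infer_instance

-- ===== CLAIM (what is proved, stated in full; the proofs are below) =====
def Claim_equal_makeAbbr : Prop := ∀ (binary : Int) (target : String), Dom_makeAbbr binary target → Spec_makeAbbr binary target (makeAbbr binary target)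

-- ===== LEMMAS AND PROOFS =====

-- A's end-of-function flush applied to the loop state
def makeAbbrFinish (st : List String × Nat) : List String :=
  st.1 ++ if st.2 > 0 then [PySem.Int.toStr st.2] else []

theorem makeAbbrRunEnd_le (binary : Int) (n j : Nat) (h : j ≤ n) :
    makeAbbrRunEnd binary n j ≤ n := by
  unfold makeAbbrRunEnd
  split
  · next hc => exact makeAbbrRunEnd_le binary n (j + 1) hc.1
  · exact h
termination_by n - j

theorem makeAbbrRunEnd_stop (binary : Int) (n j : Nat) :
    ¬ (makeAbbrRunEnd binary n j < n ∧
       PySem.Int.band binary ((1 : Int) <<< makeAbbrRunEnd binary n j) ≠ 0) := by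
  unfold makeAbbrRunEnd
  split
  · exact makeAbbrRunEnd_stop binary n (j + 1)
  · next hc => exact hc
termination_by n - j

-- inside a run A just counts: running the loop from j with pending count c lands at the
-- run's end with the count increased by the run length
theorem makeAbbrLoopA_run (binary : Int) (cs : List Char) (n : Nat) (j c : Nat)
    (parts : List String) :
    makeAbbrLoopA binary cs n j parts c =
      makeAbbrLoopA binary cs n (makeAbbrRunEnd binary n j) parts
        (c + (makeAbbrRunEnd binary n j - j)) := by
  rw [makeAbbrRunEnd]
  split
  · next hc =>
    rw [makeAbbrLoopA, if_pos hc.1, if_pos hc.2,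
        makeAbbrLoopA_run binary cs n (j + 1) (c + 1) parts]
    have := makeAbbrRunEnd_ge binary n (j + 1)
    congr 1
    omega
  · simp
termination_by n - j

-- main invariant: flushing A's loop result equals B's loop result, from any index with no pending count
theorem makeAbbr_loops_eq (binary : Int) (cs : List Char) (n : Nat) (k : Nat) :
    ∀ i parts, n ≤ n → n - i ≤ k →
      makeAbbrFinish (makeAbbrLoopA binary cs n i parts 0) =
        makeAbbrLoopB binary cs n i parts := by
  induction k with
  | zero =>
    intro i parts _ hk
    rw [makeAbbrLoopA, makeAbbrLoopB]
    have hin : ¬ i < n := by omega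
    rw [if_neg hin, dif_neg hin]
    simp [makeAbbrFinish]
  | succ k ih =>
    intro i parts _ hk
    rw [makeAbbrLoopA, makeAbbrLoopB]
    by_cases hin : i < n
    · rw [if_pos hin, dif_pos hin]
      by_cases hbit : PySem.Int.band binary ((1 : Int) <<< i) ≠ 0
      · rw [if_pos hbit, if_pos hbit]
        set e := makeAbbrRunEnd binary n (i + 1) with he
        have hge : i + 1 ≤ e := makeAbbrRunEnd_ge binary n (i + 1)
        have hle : e ≤ n := makeAbbrRunEnd_le binary n (i + 1) hin
        have hstop := makeAbbrRunEnd_stop binary n (i + 1)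
        rw [← he] at hstop
        rw [makeAbbrLoopA_run binary cs n (i + 1) 1 parts, ← he]
        have hcnt : 1 + (e - (i + 1)) = e - i := by omega
        rw [hcnt]
        have hstr : PySem.Int.toStr ((e : Int) - (i : Int)) = PySem.Int.toStr ((e - i : Nat) : Int) := by
          congr 1; omega
        by_cases hen : e < n
        · have hbe : ¬ PySem.Int.band binary ((1 : Int) <<< e) ≠ 0 := by
            intro hb; exact hstop ⟨hen, hb⟩
          rw [makeAbbrLoopA, if_pos hen, if_neg hbe, makeAbbrLoopB, dif_pos hen]
          simp only [hbe, if_false]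
          have hpos : e - i > 0 := by omega
          rw [if_pos hpos, hstr]
          exact ih (e + 1) _ (le_refl n) (by omega)
        · rw [makeAbbrLoopA, if_neg hen, makeAbbrLoopB, dif_neg hen]
          have hpos : e - i > 0 := by omega
          simp [makeAbbrFinish, hpos, hstr]
      · rw [if_neg hbit, if_neg hbit]
        exact ih (i + 1) _ (le_refl n) (by omega)
    · rw [if_neg hin, dif_neg hin]
      simp [makeAbbrFinish]

-- ===== VERDICT (by name: the statement is the Claim_ definition above) =====
theorem makeAbbr_spec : Claim_equal_makeAbbr := by
  intro binary target _
  unfold Spec_makeAbbr makeAbbr makeAbbr_alt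
  have h := makeAbbr_loops_eq binary target.toList target.toList.length
      (target.toList.length) 0 [] (le_refl _) (by omega)
  simp only [makeAbbrFinish] at h
  exact congrArg String.join h
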